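-- pv_equiv track=rewrite | github.com/overlord-bot/Overlord | cogs/degree-planner/rules.py | longest_names
-- ===== SOURCE A (Python) =====
-- def longest_names(main_list):
--     i = 0
--     longest_path_names = set()
--     for path_name in main_list.keys():
--         if i < len(main_list[path_name]):
--             i = len(main_list[path_name])
--             longest_path_names = {path_name}
--         elif i == len(main_list[path_name]):
--             longest_path_names.add(path_name)
--
--     return longest_path_names
-- ===== SOURCE B (Python) =====
-- def longest_names(main_list):
--     m = max((len(v) for v in main_list.values()), default=0)
--     return {k for k, v in main_list.items() if len(v) == m}
-- ===== Notes on version B (the rewrite author's own statement) =====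
-- stated objective: simpler
-- what changed: Replaces A's single-pass running-max loop with set resets by a two-pass decomposition: compute the maximum list length first (default 0), then a set comprehension filtering keys whose list has that length.
import Mathlib
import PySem

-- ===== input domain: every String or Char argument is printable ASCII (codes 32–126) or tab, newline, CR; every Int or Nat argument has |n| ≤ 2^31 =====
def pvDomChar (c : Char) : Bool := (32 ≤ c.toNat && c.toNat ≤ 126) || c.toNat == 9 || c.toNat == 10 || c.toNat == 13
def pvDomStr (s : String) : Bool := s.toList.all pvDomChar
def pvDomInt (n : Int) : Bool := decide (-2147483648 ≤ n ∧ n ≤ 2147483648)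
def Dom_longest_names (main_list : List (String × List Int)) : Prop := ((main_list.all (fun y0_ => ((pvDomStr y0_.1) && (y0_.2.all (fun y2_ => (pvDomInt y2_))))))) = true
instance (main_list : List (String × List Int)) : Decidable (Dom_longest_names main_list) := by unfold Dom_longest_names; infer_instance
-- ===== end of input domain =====

-- B replaces A's single-pass running-max-with-set-reset by a two-pass decomposition
-- (compute the maximum length, then filter the keys with that length); objective: simpler.

-- ===== PORT A =====
-- A iterates over the dict's keys with a running max `i`, resetting the set on a new max
-- and adding on a tie.  `{path_name}` is the one-element set literal.
def longest_names (main_list : List (String × List Int)) : List String :=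
  let d := PySem.Dict.ofList main_list
  let res := d.keys.foldl
    (fun (st : Int × PySem.Set String) path_name =>
      if st.1 < PySem.List.len (d.getD path_name []) then
        (PySem.List.len (d.getD path_name []), [path_name])
      else if st.1 = PySem.List.len (d.getD path_name []) then
        (st.1, PySem.Set.add st.2 path_name)
      else st)
    (0, PySem.Set.empty)
  res.2

-- ===== PORT B =====
-- B: m = max((len(v) for v in main_list.values()), default=0); {k for k, v in items if len(v) == m}
def longest_names_alt (main_list : List (String × List Int)) : List String :=
  let d := PySem.Dict.ofList main_list
  let m := PySem.List.maxD (d.values.map PySem.List.len) (fun x => x) 0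
  PySem.Set.ofList ((d.items.filter (fun kv => PySem.List.len kv.2 == m)).map Prod.fst)

-- ===== PRECONDITION & SPEC =====
def Spec_longest_names (main_list : List (String × List Int)) (out : List String) : Prop := out = longest_names_alt main_list
instance (main_list : List (String × List Int)) (out : List String) : Decidable (Spec_longest_names main_list out) := by unfold Spec_longest_names; infer_instance

-- ===== CLAIM (what is proved, stated in full; the proofs are below) =====
def Claim_equal_longest_names : Prop := ∀ (main_list : List (String × List Int)), Dom_longest_names main_list → Spec_longest_names main_list (longest_names main_list)

-- ===== LEMMAS AND PROOFS =====

-- running max is bounded by any common upper bound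
theorem pv_foldl_max_le {l : List Int} {a c : Int} (ha : a ≤ c) (h : ∀ y ∈ l, y ≤ c) :
    l.foldl max a ≤ c := by
  induction l generalizing a with
  | nil => exact ha
  | cons x t ih =>
      exact ih (max_le ha (h x (by simp))) (fun y hy => h y (by simp [hy]))


-- if some element of t exceeds i, the running max over t exceeds i
theorem pv_not_all_lt (t : List (String × List Int)) (i : Int)
    (h : ¬ (t.all (fun kv => decide (((kv.2.length : Int)) ≤ i)) = true)) :
    i < (t.map (fun kv => ((kv.2.length : Int)))).foldl max i := by
  simp only [List.all_eq_true, decide_eq_true_eq] at h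
  push Not at h
  obtain ⟨kv, hkv, hgt⟩ := h
  have hb := (PySem.List.le_foldl_max (t.map (fun kv => ((kv.2.length : Int)))) i).2
    (((kv.2.length : Int))) (List.mem_map_of_mem hkv)
  omega

-- A's loop, after the keys/getD plumbing is removed: a characterisation by running max and filter.
theorem pv_foldA_eq (l : List (String × List Int)) :
    ∀ (i : Int) (s : List String), 0 ≤ i →
    (l.map Prod.fst).Nodup → (∀ kv ∈ l, kv.1 ∉ s) →
    l.foldl
      (fun (st : Int × PySem.Set String) kv =>
        if st.1 < ((kv.2.length : Int)) then (((kv.2.length : Int)), [kv.1])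
        else if st.1 = ((kv.2.length : Int)) then (st.1, PySem.Set.add st.2 kv.1)
        else st)
      (i, s) =
    ((l.map (fun kv => ((kv.2.length : Int)))).foldl max i,
     if l.all (fun kv => decide (((kv.2.length : Int)) ≤ i)) then
       s ++ (l.filter (fun kv => ((kv.2.length : Int)) == i)).map Prod.fst
     else (l.filter (fun kv => ((kv.2.length : Int)) == (l.map (fun kv => ((kv.2.length : Int)))).foldl max i)).map Prod.fst) := by
  induction l with
  | nil => intro i s _ _ _; simp
  | cons x t ih =>
      intro i s hi hnd hdisj
      simp only [List.map_cons, List.foldl_cons, List.all_cons, List.filter_cons]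
      have hx1t : x.1 ∉ t.map Prod.fst := (List.nodup_cons.mp hnd).1
      have hndt : (t.map Prod.fst).Nodup := (List.nodup_cons.mp hnd).2
      set n := ((x.2.length : Int)) with hn
      have hn0 : 0 ≤ n := by positivity
      by_cases h1 : i < n
      · -- new maximum: reset to {x.1}
        simp only [if_pos h1]
        have hdisj' : ∀ kv ∈ t, kv.1 ∉ ([x.1] : List String) := by
          intro kv hkv
          simp only [List.mem_singleton]
          intro he
          exact hx1t (he ▸ List.mem_map_of_mem hkv)
        rw [ih n [x.1] hn0 hndt hdisj', max_eq_right (le_of_lt h1)]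
        have hni : ¬ n ≤ i := not_le.mpr h1
        by_cases h2 : t.all (fun kv => decide (((kv.2.length : Int)) ≤ n))
        · have hM : (t.map (fun kv => ((kv.2.length : Int)))).foldl max n = n := by
            apply le_antisymm
            · apply pv_foldl_max_le le_rfl
              intro y hy
              obtain ⟨kv, hkv, rfl⟩ := List.mem_map.mp hy
              exact of_decide_eq_true (List.all_eq_true.mp h2 kv hkv)
            · exact (PySem.List.le_foldl_max (t.map (fun kv => ((kv.2.length : Int)))) n).1
          simp [h2, hM, hni]
        · have hlt : n < (t.map (fun kv => ((kv.2.length : Int)))).foldl max n :=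
            pv_not_all_lt t n h2
          have hne : (n == (t.map (fun kv => ((kv.2.length : Int)))).foldl max n) = false := by
            simp only [beq_eq_false_iff_ne, ne_eq]; omega
          simp [h2, hni, hne]
      · simp only [if_neg h1]
        have hin : max i n = i := max_eq_left (not_lt.mp h1)
        by_cases h2 : i = n
        · -- tie: add x.1 to the set
          simp only [if_pos h2]
          have hxs : PySem.Set.add s x.1 = s ++ [x.1] := by
            simp [PySem.Set.add, PySem.Set.contains, hdisj x (by simp)]
          rw [hxs]
          have hdisj' : ∀ kv ∈ t, kv.1 ∉ s ++ [x.1] := by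
            intro kv hkv
            simp only [List.mem_append, List.mem_singleton]
            rintro (hs | he)
            · exact hdisj kv (by simp [hkv]) hs
            · exact hx1t (he ▸ List.mem_map_of_mem hkv)
          rw [ih i (s ++ [x.1]) hi hndt hdisj', hin]
          have hni' : decide (n ≤ i) = true := by simp [h2]
          have heq : (n == i) = true := by simp [h2]
          by_cases h3 : t.all (fun kv => decide (((kv.2.length : Int)) ≤ i))
          · simp [h3, hni', heq]
          · have hlt : i < (t.map (fun kv => ((kv.2.length : Int)))).foldl max i :=
              pv_not_all_lt t i h3
            have hne : (n == (t.map (fun kv => ((kv.2.length : Int)))).foldl max i) = false := by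
              simp only [beq_eq_false_iff_ne, ne_eq]; omega
            simp [h3, hni', hne]
        · -- shorter than the current maximum: state unchanged
          have h3 : n < i := lt_of_le_of_ne (not_lt.mp h1) (fun he => h2 he.symm)
          simp only [if_neg h2]
          rw [ih i s hi hndt (fun kv hkv => hdisj kv (by simp [hkv])), hin]
          have hni' : decide (n ≤ i) = true := by simp [le_of_lt h3]
          have hne0 : (n == i) = false := by
            simp only [beq_eq_false_iff_ne, ne_eq]; omega
          by_cases h4 : t.all (fun kv => decide (((kv.2.length : Int)) ≤ i))
          · simp [h4, hni', hne0]
          · have hlt : i < (t.map (fun kv => ((kv.2.length : Int)))).foldl max i :=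
              pv_not_all_lt t i h4
            have hne : (n == (t.map (fun kv => ((kv.2.length : Int)))).foldl max i) = false := by
              simp only [beq_eq_false_iff_ne, ne_eq]; omega
            simp [h4, hni', hne]

-- max(xs, default=0) of a list of nonnegative ints is the running max from 0
theorem pv_maxD_nonneg (xs : List Int) (h : ∀ y ∈ xs, 0 ≤ y) :
    PySem.List.maxD xs (fun x => x) 0 = xs.foldl max 0 := by
  cases xs with
  | nil => rfl
  | cons x t =>
      have hx : max 0 x = x := max_eq_right (h x (by simp))
      simp [PySem.List.maxD, PySem.List.max?_id_cons, hx]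

-- ===== VERDICT (by name: the statement is the Claim_ definition above) =====
theorem longest_names_spec : Claim_equal_longest_names := by
  intro main_list _
  unfold Spec_longest_names
  simp only [longest_names, longest_names_alt]
  set d := PySem.Dict.ofList main_list with hd
  have hnd : d.keys.Nodup := PySem.Dict.nodup_keys_ofList main_list
  have hndm : (d.items.map Prod.fst).Nodup := hnd
  have hkeys : d.keys = d.items.map Prod.fst := rfl
  rw [hkeys, List.foldl_map]
  have hstep : ∀ (st : Int × PySem.Set String) (kv : String × List Int), kv ∈ d.items →
      (if st.1 < PySem.List.len (d.getD kv.1 []) then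
         (PySem.List.len (d.getD kv.1 []), [kv.1])
       else if st.1 = PySem.List.len (d.getD kv.1 []) then
         (st.1, PySem.Set.add st.2 kv.1)
       else st)
      = (if st.1 < ((kv.2.length : Int)) then (((kv.2.length : Int)), [kv.1])
         else if st.1 = ((kv.2.length : Int)) then (st.1, PySem.Set.add st.2 kv.1)
         else st) := by
    intro st kv hkv
    have hg : d.getD kv.1 [] = kv.2 :=
      PySem.Dict.getD_of_mem_items d (by simpa using hkv) hnd []
    simp [hg, PySem.List.len_eq]
  rw [PySem.List.foldl_congr_mem d.items
        (fun (st : Int × PySem.Set String) kv =>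
          if st.1 < PySem.List.len (d.getD kv.1 []) then
            (PySem.List.len (d.getD kv.1 []), [kv.1])
          else if st.1 = PySem.List.len (d.getD kv.1 []) then
            (st.1, PySem.Set.add st.2 kv.1)
          else st)
        (fun (st : Int × PySem.Set String) kv =>
          if st.1 < ((kv.2.length : Int)) then (((kv.2.length : Int)), [kv.1])
          else if st.1 = ((kv.2.length : Int)) then (st.1, PySem.Set.add st.2 kv.1)
          else st)
        (0, PySem.Set.empty) hstep]
  rw [pv_foldA_eq d.items 0 PySem.Set.empty le_rfl hndm (by simp [PySem.Set.empty])]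
  have hvals : d.values.map PySem.List.len = d.items.map (fun kv => ((kv.2.length : Int))) := by
    show (d.items.map Prod.snd).map PySem.List.len = _
    simp [Function.comp_def, PySem.List.len_eq]
  rw [hvals, pv_maxD_nonneg _ (by
    intro y hy
    obtain ⟨kv, _, rfl⟩ := List.mem_map.mp hy
    positivity)]
  have hsub : ∀ (m : Int), ((d.items.filter (fun kv => PySem.List.len kv.2 == m)).map Prod.fst).Nodup :=
    fun m => hndm.sublist (List.Sublist.map Prod.fst List.filter_sublist)
  rw [PySem.Set.ofList_eq_self_of_nodup _ (hsub _)]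
  simp only [PySem.List.len_eq]
  by_cases hall : d.items.all (fun kv => decide (((kv.2.length : Int)) ≤ 0))
  · have hM0 : (d.items.map (fun kv => ((kv.2.length : Int)))).foldl max 0 = 0 := by
      apply le_antisymm
      · apply pv_foldl_max_le le_rfl
        intro y hy
        obtain ⟨kv, hkv, rfl⟩ := List.mem_map.mp hy
        exact of_decide_eq_true (List.all_eq_true.mp hall kv hkv)
      · exact (PySem.List.le_foldl_max (d.items.map (fun kv => ((kv.2.length : Int)))) 0).1
    rw [if_pos hall, hM0]
    simp
  · rw [if_neg hall]
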